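-- pv_equiv track=rewrite | github.com/FAA-Lab/ADSB_raw | utils/position.py | find_pair_loc
-- ===== SOURCE A (Python) =====
-- def find_pair_loc(oe_list):
--     i = oe_list[0]
--     loc_list = list()
--     for j, v in enumerate(oe_list):
--         if v != i:
--             loc_list.append(j-1)
--             i = v
--     return loc_list
-- ===== SOURCE B (Python) =====
-- def run_lengths(xs):
--     # decompose xs into maximal runs of equal values, returning their lengths
--     runs = []
--     i = 0
--     n = len(xs)
--     while i < n:
--         k = i + 1
--         while k < n and xs[k] == xs[i]:
--             k += 1
--         runs.append(k - i)
--         i = k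
--     return runs
--
--
-- def find_pair_loc(oe_list):
--     runs = run_lengths(oe_list)
--     out, total = [], 0
--     for m in runs[:-1]:
--         total += m
--         out.append(total - 1)
--     return out
-- ===== Notes on version B (the rewrite author's own statement) =====
-- stated objective: alternative
-- what changed: Replaces A's stateful scan-and-compare with a two-stage run-length decomposition: first compute the lengths of maximal equal runs, then emit cumulative-length minus one for every run except the last.
import Mathlib
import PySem

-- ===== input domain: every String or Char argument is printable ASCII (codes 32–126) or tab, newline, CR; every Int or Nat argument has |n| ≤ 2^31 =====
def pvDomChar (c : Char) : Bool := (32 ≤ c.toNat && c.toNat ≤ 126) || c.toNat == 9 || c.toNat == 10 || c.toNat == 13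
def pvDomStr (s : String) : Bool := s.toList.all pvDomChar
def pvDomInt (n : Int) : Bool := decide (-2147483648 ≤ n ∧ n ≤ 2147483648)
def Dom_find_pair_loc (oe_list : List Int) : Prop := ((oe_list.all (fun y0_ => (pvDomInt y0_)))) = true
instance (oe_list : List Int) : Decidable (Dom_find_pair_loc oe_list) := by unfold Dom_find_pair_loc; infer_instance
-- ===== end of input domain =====

-- B replaces A's stateful change-scan by a two-stage run-length decomposition
-- (run lengths, then cumulative sums); same cost, different structure.
-- Pre_ excludes [] where A raises IndexError; B returns [] there.

-- ===== PORT A =====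
-- A: i = oe_list[0] (IndexError on []); then loop over enumerate, appending j-1 on change.
def find_pair_loc (oe_list : List Int) : List Int :=
  match oe_list with
  | [] => []   -- Python raises IndexError here; excluded by Pre_find_pair_loc
  | i0 :: _ =>
    ((PySem.List.enumerate oe_list 0).foldl
      (fun (st : Int × List Int) jv =>
        if jv.2 ≠ st.1 then (jv.2, st.2 ++ [jv.1 - 1]) else st)
      (i0, [])).2

-- ===== PORT B =====
-- Source B's while loop counting the matching prefix beyond the head, as a recursion
def pvRunCount (x : Int) : List Int → Nat
  | [] => 0
  | y :: rest => if y = x then 1 + pvRunCount x rest else 0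

-- Source B's run_lengths: lengths of the maximal runs of equal values
def run_lengths : List Int → List Int
  | [] => []
  | x :: rest =>
    let c := pvRunCount x rest
    ((1 + c : Nat) : Int) :: run_lengths (rest.drop c)
termination_by l => l.length
decreasing_by simp

def find_pair_loc_alt (oe_list : List Int) : List Int :=
  ((run_lengths oe_list).dropLast.foldl
    (fun (st : List Int × Int) n => (st.1 ++ [st.2 + n - 1], st.2 + n))
    ([], 0)).1

-- ===== PRECONDITION & SPEC =====
-- A raises IndexError (oe_list[0]) on the empty list; that is the only exclusion.
def Pre_find_pair_loc (oe_list : List Int) : Prop := oe_list ≠ []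
instance (oe_list : List Int) : Decidable (Pre_find_pair_loc oe_list) := by unfold Pre_find_pair_loc; infer_instance
def pvWitness_find_pair_loc : List Int := [1, 1, 2, 2, 3]

def Spec_find_pair_loc (oe_list : List Int) (out : List Int) : Prop := out = find_pair_loc_alt oe_list
instance (oe_list : List Int) (out : List Int) : Decidable (Spec_find_pair_loc oe_list out) := by unfold Spec_find_pair_loc; infer_instance

-- ===== CLAIM (what is proved, stated in full; the proofs are below) =====
def Claim_equal_find_pair_loc : Prop := ∀ (oe_list : List Int), Dom_find_pair_loc oe_list → Pre_find_pair_loc oe_list → Spec_find_pair_loc oe_list (find_pair_loc oe_list)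

-- ===== LEMMAS AND PROOFS =====

-- equation lemmas for the well-founded run_lengths
lemma rl_nil : run_lengths [] = [] := by rw [run_lengths.eq_def]
lemma rl_cons (x : Int) (rest : List Int) :
    run_lengths (x :: rest)
      = ((1 + pvRunCount x rest : Nat) : Int) :: run_lengths (rest.drop (pvRunCount x rest)) := by
  rw [run_lengths.eq_def]

-- reference form: the indices of adjacent unequal pairs, offset by s
def refB (l : List Int) (s : Int) : List Int :=
  (PySem.List.enumerate (l.zip (l.drop 1)) s).filterMap
    (fun p => if p.2.1 ≠ p.2.2 then some p.1 else none)

-- A's fold over (enumerate l s) started in state (c, acc) appends exactly the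
-- boundary indices of (c :: l), shifted so the pair (c, head l) sits at index s-1.
lemma find_pair_loc_loop_eq (l : List Int) (c s : Int) (acc : List Int) :
    ((PySem.List.enumerate l s).foldl
      (fun (st : Int × List Int) jv =>
        if jv.2 ≠ st.1 then (jv.2, st.2 ++ [jv.1 - 1]) else st)
      (c, acc)).2
    = acc ++ (PySem.List.enumerate ((c :: l).zip l) (s - 1)).filterMap
        (fun p => if p.2.1 ≠ p.2.2 then some p.1 else none) := by
  induction l generalizing c s acc with
  | nil => simp [PySem.List.enumerate_nil]
  | cons v rest ih =>
    simp only [PySem.List.enumerate_cons, List.zip_cons_cons, List.foldl_cons,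
      List.filterMap_cons]
    by_cases h : v = c
    · subst h
      simp only [ne_eq, not_true_eq_false, if_false]
      have := ih v (s + 1) acc
      simpa using this
    · have hcv : ¬c = v := fun e => h e.symm
      simp only [ne_eq, h, hcv, not_false_eq_true, if_true, sub_add_cancel]
      have := ih v (s + 1) (acc ++ [s - 1])
      simp only [add_sub_cancel_right] at this
      rw [this, List.append_assoc]
      rfl

-- peeling one maximal run off the front of refB
lemma refB_run (rest : List Int) (x : Int) (s : Int) :
    refB (x :: rest) s =
      if rest.drop (pvRunCount x rest) = [] then []
      else (s + (pvRunCount x rest : Int)) ::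
        refB (rest.drop (pvRunCount x rest)) (s + (pvRunCount x rest : Int) + 1) := by
  induction rest generalizing x s with
  | nil => simp [refB, pvRunCount, PySem.List.enumerate_nil]
  | cons y rs ih =>
    by_cases h : y = x
    · subst h
      have step : refB (y :: y :: rs) s = refB (y :: rs) (s + 1) := by
        simp [refB, PySem.List.enumerate_cons]
      have hcount : pvRunCount y (y :: rs) = 1 + pvRunCount y rs := by
        simp [pvRunCount]
      have hdrop : (y :: rs).drop (1 + pvRunCount y rs) = rs.drop (pvRunCount y rs) := by
        rw [Nat.add_comm, List.drop_succ_cons]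
      rw [step, ih y (s + 1), hcount, hdrop]
      by_cases hd : rs.drop (pvRunCount y rs) = []
      · rw [if_pos hd, if_pos hd]
      · rw [if_neg hd, if_neg hd]
        congr 1
        · push_cast; ring
        · congr 1
          push_cast; ring
    · have h' : ¬x = y := fun e => h e.symm
      have hstep : refB (x :: y :: rs) s = s :: refB (y :: rs) (s + 1) := by
        simp [refB, PySem.List.enumerate_cons, h']
      have hcount : pvRunCount x (y :: rs) = 0 := by
        simp [pvRunCount, h]
      rw [hstep, hcount]
      simp

lemma run_lengths_nil_iff (l : List Int) : run_lengths l = [] ↔ l = [] := by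
  cases l with
  | nil => simp [rl_nil]
  | cons x rest => simp [rl_cons]

-- B's cumulative-sum fold over the run lengths equals refB
lemma foldB_eq (l : List Int) (t : Int) (acc : List Int) :
    ((run_lengths l).dropLast.foldl
      (fun (st : List Int × Int) n => (st.1 ++ [st.2 + n - 1], st.2 + n))
      (acc, t)).1 = acc ++ refB l t := by
  induction l using run_lengths.induct generalizing t acc with
  | case1 => simp [rl_nil, refB, PySem.List.enumerate_nil]
  | case2 x rest c ih =>
    rw [rl_cons]
    rw [show pvRunCount x rest = c from rfl]
    by_cases hd : rest.drop c = []
    · have h0 : run_lengths (rest.drop c) = [] := by rw [hd, rl_nil]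
      rw [h0, refB_run, if_pos hd]
      simp
    · have hrl : run_lengths (rest.drop c) ≠ [] := by
        simpa [run_lengths_nil_iff] using hd
      rw [List.dropLast_cons_of_ne_nil hrl, List.foldl_cons]
      rw [ih]
      rw [refB_run, if_neg hd]
      have h1 : t + ((1 + c : Nat) : Int) - 1 = t + (c : Int) := by push_cast; ring
      have h2 : t + ((1 + c : Nat) : Int) = t + (c : Int) + 1 := by push_cast; ring
      rw [h1, h2, List.append_assoc]
      rfl

-- ===== VERDICT (by name: the statement is the Claim_ definition above) =====
theorem find_pair_loc_spec : Claim_equal_find_pair_loc := by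
  intro oe_list _ hpre
  unfold Spec_find_pair_loc
  match oe_list with
  | [] => exact absurd rfl hpre
  | i0 :: rest =>
    show ((PySem.List.enumerate (i0 :: rest) 0).foldl _ (i0, [])).2 = _
    rw [find_pair_loc_loop_eq]
    unfold find_pair_loc_alt
    rw [foldB_eq]
    simp only [List.zip_cons_cons, PySem.List.enumerate_cons, List.filterMap_cons,
      ne_eq, not_true_eq_false, ite_false, List.nil_append]
    norm_num [refB]
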